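-- pv_equiv track=rewrite | github.com/metaliuyc/Compact-traces | main.py | partition_to_sequences
-- ===== SOURCE A (Python) =====
-- def partition_to_sequences(partition):
--     # Initialize variables
--     sequences_of_integers = []
--     current_value = 1
--     # Iterate through the partition
--     for part_size in partition:
--         current_sequence = list(range(current_value, current_value + part_size))
--         sequences_of_integers.append(current_sequence)
--         current_value += part_size
--     return sequences_of_integers
-- ===== SOURCE B (Python) =====
-- def partition_to_sequences(partition):
--     # Two-pass decomposition: first a boundary table of cumulative start
--     # offsets, then the sub-sequences from adjacent boundary pairs.
--     bounds = [1]
--     for part_size in partition: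
--         bounds.append(bounds[-1] + part_size)
--     return [list(range(a, b)) for a, b in zip(bounds, bounds[1:])]
-- ===== Notes on version B (the rewrite author's own statement) =====
-- stated objective: alternative
-- what changed: B replaces A's single loop carrying a running current_value accumulator with two separate passes: it first builds a boundary table of cumulative start offsets, then maps list(range(a,b)) over adjacent boundary pairs.
import Mathlib
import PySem

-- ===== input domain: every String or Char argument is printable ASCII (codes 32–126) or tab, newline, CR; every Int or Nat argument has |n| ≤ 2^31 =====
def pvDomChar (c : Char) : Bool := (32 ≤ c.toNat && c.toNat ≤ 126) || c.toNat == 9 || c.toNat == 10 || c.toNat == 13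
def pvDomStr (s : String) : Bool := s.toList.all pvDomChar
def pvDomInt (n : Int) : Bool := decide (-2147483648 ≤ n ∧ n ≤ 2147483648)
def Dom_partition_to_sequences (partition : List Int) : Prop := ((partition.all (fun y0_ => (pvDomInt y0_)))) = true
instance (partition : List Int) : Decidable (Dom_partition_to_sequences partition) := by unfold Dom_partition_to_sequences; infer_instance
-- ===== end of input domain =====

-- ===== PORT A =====
def partition_to_sequences (partition : List Int) : List (List Int) :=
  (partition.foldl
    (fun (st : List (List Int) × Int) part_size =>
      (st.1 ++ [PySem.List.pyRange st.2 (st.2 + part_size) 1], st.2 + part_size))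
    ([], 1)).1

-- ===== PORT B =====
-- boundary table of cumulative start offsets (bounds[0] = 1, bounds[i+1] = bounds[i] + partition[i])
def pvBounds (c : Int) : List Int → List Int
  | [] => [c]
  | p :: rest => c :: pvBounds (c + p) rest

def partition_to_sequences_alt (partition : List Int) : List (List Int) :=
  let bounds := pvBounds 1 partition
  (bounds.zip bounds.tail).map (fun ab => PySem.List.pyRange ab.1 ab.2 1)

-- ===== PRECONDITION & SPEC =====
def Spec_partition_to_sequences (partition : List Int) (out : List (List Int)) : Prop := out = partition_to_sequences_alt partition
instance (partition : List Int) (out : List (List Int)) : Decidable (Spec_partition_to_sequences partition out) := by unfold Spec_partition_to_sequences; infer_instance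

-- ===== CLAIM (what is proved, stated in full; the proofs are below) =====
def Claim_equal_partition_to_sequences : Prop := ∀ (partition : List Int), Dom_partition_to_sequences partition → Spec_partition_to_sequences partition (partition_to_sequences partition)

-- ===== LEMMAS AND PROOFS =====

-- ===== VERDICT (by name: the statement is the Claim_ definition above) =====
theorem pvBounds_head (c : Int) (l : List Int) : (pvBounds c l).head? = some c := by
  cases l <;> rfl

theorem pv_fold_eq (l : List Int) : ∀ (c : Int) (acc : List (List Int)),
    (l.foldl
      (fun (st : List (List Int) × Int) part_size =>
        (st.1 ++ [PySem.List.pyRange st.2 (st.2 + part_size) 1], st.2 + part_size))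
      (acc, c)).1
    = acc ++ ((pvBounds c l).zip (pvBounds c l).tail).map
        (fun ab => PySem.List.pyRange ab.1 ab.2 1) := by
  induction l with
  | nil => intro c acc; simp [pvBounds]
  | cons p rest ih =>
    intro c acc
    have hh : (pvBounds (c + p) rest).head? = some (c + p) := pvBounds_head _ _
    cases hb : pvBounds (c + p) rest with
    | nil => simp [hb] at hh
    | cons b0 bs =>
      rw [hb] at hh
      simp only [List.head?] at hh
      injection hh with hb0
      subst hb0
      simp only [List.foldl, pvBounds, hb, List.tail, List.zip_cons_cons, List.map_cons]
      rw [ih (c + p) (acc ++ [PySem.List.pyRange c (c + p) 1])]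
      simp [hb, List.append_assoc]

theorem partition_to_sequences_spec : Claim_equal_partition_to_sequences := by
  intro partition _
  unfold Spec_partition_to_sequences partition_to_sequences partition_to_sequences_alt
  exact pv_fold_eq partition 1 []
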